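-- pv_equiv track=rewrite | github.com/modernLifeRocko/AoCsolver | 2023/14/reflector.py | findTiltIndex
-- ===== SOURCE A (Python) =====
-- def findTiltIndex(platform: list[list[str]], loc: tuple[int, int])->int:
--     y = loc[0]
--     x = loc[1]
--     colx = [platform[i][x] for i, _ in enumerate(platform) if i<y]
--     for i, sq in enumerate(reversed(colx)):
--         if sq =='.': continue
--         return y-i
--     return 0
-- ===== SOURCE B (Python) =====
-- def findTiltIndex(platform: list[list[str]], loc: tuple[int, int]) -> int:
--     y = loc[0]
--     x = loc[1]
--     dots = 0      # length of the trailing run of '.' in the column below y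
--     seen = False  # whether any non-'.' cell exists below y
--     for r in range(min(y, len(platform))):
--         if platform[r][x] == '.':
--             dots += 1
--         else:
--             dots = 0
--             seen = True
--     return y - dots if seen else 0
-- ===== Notes on version B (the rewrite author's own statement) =====
-- stated objective: simpler
-- what changed: Replaces A's build-a-column-list, reverse it and early-return scan with a single forward pass that counts the trailing run of '.' cells (reset to 0 at every non-'.' cell), returning y - dots when any non-'.' cell was seen; no intermediate list, no reversal, no early return.
import Mathlib
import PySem

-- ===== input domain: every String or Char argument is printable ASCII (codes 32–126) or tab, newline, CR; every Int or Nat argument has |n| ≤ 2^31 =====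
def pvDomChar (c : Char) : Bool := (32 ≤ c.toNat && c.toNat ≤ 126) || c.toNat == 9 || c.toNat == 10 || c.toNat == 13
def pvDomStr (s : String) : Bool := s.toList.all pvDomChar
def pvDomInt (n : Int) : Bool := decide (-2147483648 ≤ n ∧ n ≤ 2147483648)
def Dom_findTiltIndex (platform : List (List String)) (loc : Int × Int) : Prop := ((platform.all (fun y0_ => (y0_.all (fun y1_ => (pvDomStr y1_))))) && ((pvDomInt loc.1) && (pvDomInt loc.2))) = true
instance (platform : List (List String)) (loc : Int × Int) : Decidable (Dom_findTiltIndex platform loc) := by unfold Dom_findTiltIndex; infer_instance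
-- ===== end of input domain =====

-- B replaces A's build-column / reverse / early-return scan with one forward pass
-- counting the trailing run of '.' cells (objective: simpler).

-- ===== PORT A =====
-- the 'for i, sq in enumerate(reversed(colx)): if sq == '.': continue; return y-i' loop
def pvGoA (y : Int) (i : Int) : List String → Int
  | [] => 0
  | sq :: rest => if sq = "." then pvGoA y (i + 1) rest else y - i

-- y = loc.1, x = loc.2; colx is the comprehension, platform[i][x] via pyGetD (total form, exact under Pre_)
def findTiltIndex (platform : List (List String)) (loc : Int × Int) : Int :=
  pvGoA loc.1 0
    ((((PySem.List.enumerate platform).filter (fun p => p.1 < loc.1)).map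
      (fun p => PySem.List.pyGetD p.2 loc.2 "")).reverse)

-- ===== PORT B =====
-- state (dots, seen); 'for r in range(min(y, len(platform))): …' as a fold over pyRange
def findTiltIndex_alt (platform : List (List String)) (loc : Int × Int) : Int :=
  let s := (PySem.List.pyRange 0 (min loc.1 (platform.length : Int)) 1).foldl
    (fun (st : Int × Bool) r =>
      if PySem.List.pyGetD (PySem.List.pyGetD platform r []) loc.2 "" = "."
      then (st.1 + 1, st.2) else (0, true))
    (0, false)
  if s.2 then loc.1 - s.1 else 0

-- ===== PRECONDITION & SPEC =====
-- Pre_ excludes exactly the inputs on which A raises IndexError while building the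
-- column: some row with index below y lacking column x (B raises there too).
def Pre_findTiltIndex (platform : List (List String)) (loc : Int × Int) : Prop :=
  ∀ row ∈ platform.take loc.1.toNat, PySem.Raise.InRange row.length loc.2

instance (platform : List (List String)) (loc : Int × Int) : Decidable (Pre_findTiltIndex platform loc) := by
  unfold Pre_findTiltIndex; infer_instance

def pvWitness_findTiltIndex : List (List String) × (Int × Int) := ([["O"], ["."], ["#"]], (3, 0))

def Spec_findTiltIndex (platform : List (List String)) (loc : Int × Int) (out : Int) : Prop := out = findTiltIndex_alt platform loc
instance (platform : List (List String)) (loc : Int × Int) (out : Int) : Decidable (Spec_findTiltIndex platform loc out) := by unfold Spec_findTiltIndex; infer_instance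

-- ===== CLAIM (what is proved, stated in full; the proofs are below) =====
def Claim_equal_findTiltIndex : Prop := ∀ (platform : List (List String)) (loc : Int × Int), Dom_findTiltIndex platform loc → Pre_findTiltIndex platform loc → Spec_findTiltIndex platform loc (findTiltIndex platform loc)

-- ===== LEMMAS AND PROOFS =====

-- shifting the enumerate counter of A's scan out of the way
theorem pvGoA_shift (l : List String) : ∀ (y i : Int), pvGoA y i l = pvGoA (y - i) 0 l := by
  induction l with
  | nil => intro y i; rfl
  | cons sq rest ih =>
      intro y i
      by_cases h : sq = "."
      · rw [show pvGoA y i (sq :: rest) = pvGoA y (i + 1) rest from by simp [pvGoA, h]]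
        rw [show pvGoA (y - i) 0 (sq :: rest) = pvGoA (y - i) (0 + 1) rest from by simp [pvGoA, h]]
        rw [ih y (i + 1), ih (y - i) (0 + 1)]
        congr 1
        omega
      · simp [pvGoA, h]

-- filtering enumerate on an index bound is taking a prefix
theorem pvEnumFilter (l : List (List String)) : ∀ (s y : Int),
    ((PySem.List.enumerate l s).filter (fun p => p.1 < y)) =
      PySem.List.enumerate (l.take (y - s).toNat) s := by
  induction l with
  | nil => intro s y; simp [PySem.List.enumerate_nil]
  | cons a l ih =>
      intro s y
      rw [PySem.List.enumerate_cons]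
      by_cases h : s < y
      · have h1 : (y - s).toNat = (y - (s + 1)).toNat + 1 := by omega
        simp only [h1, List.take_succ_cons, PySem.List.enumerate_cons, List.filter_cons]
        simp [h, ih]
      · have h1 : (y - s).toNat = 0 := by omega
        have h2 : (y - (s + 1)).toNat = 0 := by omega
        simp only [h1, List.take_zero, PySem.List.enumerate_nil, List.filter_cons]
        simp only [decide_eq_true_eq, h, if_false]
        have := ih (s + 1) y
        rw [h2] at this
        simpa [PySem.List.enumerate_nil, h] using this

theorem pvMapSnd (x : Int) (l : List (List String)) : ∀ (s : Int),
    (PySem.List.enumerate l s).map (fun p => PySem.List.pyGetD p.2 x "") =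
      l.map (fun row => PySem.List.pyGetD row x "") := by
  induction l with
  | nil => intro s; simp [PySem.List.enumerate_nil]
  | cons a l ih => intro s; simp [PySem.List.enumerate_cons, ih]

-- B's state transition on an abstract column
def pvStep (st : Int × Bool) (a : String) : Int × Bool :=
  if a = "." then (st.1 + 1, st.2) else (0, true)

-- the core: A's reversed early-return scan equals B's trailing-dot-run fold
theorem pvCore (c : List String) (y : Int) :
    pvGoA y 0 c.reverse =
      (let s := c.foldl pvStep (0, false); if s.2 then y - s.1 else 0) := by
  induction c using List.reverseRecOn generalizing y with
  | nil => rfl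
  | append_singleton d a ih =>
      rw [List.reverse_append, List.reverse_singleton, List.singleton_append,
          List.foldl_append]
      by_cases h : a = "."
      · rw [show pvGoA y 0 (a :: d.reverse) = pvGoA y (0 + 1) d.reverse from by
          simp [pvGoA, h]]
        rw [pvGoA_shift, ih (y - (0 + 1))]
        simp only [List.foldl_cons, List.foldl_nil, pvStep, h, if_true]
        by_cases hs : (d.foldl pvStep (0, false)).2
        · simp only [hs, if_true]
          omega
        · simp [hs]
      · rw [show pvGoA y 0 (a :: d.reverse) = y - 0 from by simp [pvGoA, h]]
        simp [pvStep, h]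

theorem findTiltIndex_eq (platform : List (List String)) (loc : Int × Int)
    (hpre : Pre_findTiltIndex platform loc) :
    findTiltIndex platform loc = findTiltIndex_alt platform loc := by
  obtain ⟨y, x⟩ := loc
  unfold findTiltIndex findTiltIndex_alt
  simp only
  set n : Int := min y (platform.length : Int) with hn
  set c : List String := (platform.take y.toNat).map (fun row => PySem.List.pyGetD row x "") with hc
  have hclen : c.length = n.toNat := by
    simp [hc, List.length_take]
    omega
  -- A's column list is c
  have hcolx : ((PySem.List.enumerate platform).filter (fun p => p.1 < y)).map
      (fun p => PySem.List.pyGetD p.2 x "") = c := by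
    have h1 := pvEnumFilter platform 0 y
    simp only [Int.sub_zero] at h1
    rw [h1, pvMapSnd, hc]
  rw [hcolx]
  -- B's fold over pyRange is the fold over c
  rw [PySem.List.pyRange_one 0 n]
  simp only [Int.sub_zero, Int.zero_add, List.foldl_map]
  have hfold : (List.range n.toNat).foldl
      (fun (st : Int × Bool) (k : Nat) =>
        if PySem.List.pyGetD (PySem.List.pyGetD platform (k : Int) []) x "" = "."
        then (st.1 + 1, st.2) else (0, true)) (0, false) =
      c.foldl pvStep (0, false) := by
    have h2 : (List.range n.toNat).foldl
        (fun (st : Int × Bool) (k : Nat) =>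
          if PySem.List.pyGetD (PySem.List.pyGetD platform (k : Int) []) x "" = "."
          then (st.1 + 1, st.2) else (0, true)) (0, false) =
        (List.range c.length).foldl
        (fun (st : Int × Bool) (k : Nat) => pvStep st (c.getD k "")) (0, false) := by
      rw [hclen]
      apply PySem.List.foldl_congr_mem
      intro st k hk
      have hk' : k < n.toNat := List.mem_range.mp hk
      have hklen : k < platform.length := by omega
      have hrow : PySem.List.pyGetD platform (k : Int) [] = platform[k] := by
        rw [PySem.List.pyGetD_natCast]
        simp [List.getD, List.getElem?_eq_getElem hklen]
      have hck : c.getD k "" = PySem.List.pyGetD platform[k] x "" := by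
        have hkc : k < c.length := by omega
        rw [List.getD, List.getElem?_eq_getElem hkc]
        simp [hc]
      rw [hrow, pvStep, hck]
    rw [h2]
    -- fold over range with getD = fold over the list
    clear hclen h2
    generalize ((0 : Int), false) = st0
    induction c using List.reverseRecOn generalizing st0 with
    | nil => rfl
    | append_singleton d a ih =>
        rw [List.length_append, List.length_singleton, List.range_succ,
            List.foldl_append, List.foldl_append]
        rw [show (List.range d.length).foldl
              (fun (st : Int × Bool) (k : Nat) => pvStep st ((d ++ [a]).getD k "")) st0 =
            (List.range d.length).foldl
              (fun (st : Int × Bool) (k : Nat) => pvStep st (d.getD k "")) st0 from by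
          apply PySem.List.foldl_congr_mem
          intro st k hk
          have hk' : k < d.length := List.mem_range.mp hk
          rw [List.getD, List.getD, List.getElem?_append_left hk']]
        rw [ih]
        simp [List.getD]
  rw [hfold]
  exact pvCore c y

-- ===== VERDICT (by name: the statement is the Claim_ definition above) =====
theorem findTiltIndex_spec : Claim_equal_findTiltIndex := by
  intro platform loc _ hpre
  unfold Spec_findTiltIndex
  exact findTiltIndex_eq platform loc hpre
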